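-- pv_equiv track=rewrite | github.com/JihyeHaley/TIL | 17_TwigFarm/DB_Extract/utils/word_pos_utils.py | _find_SL_idx
-- ===== SOURCE A (Python) =====
-- def _find_SL_idx(mor_list):
--     stop_idx = 0
--     for idx, mor in enumerate(mor_list):
--         if mor[1] == 'SL':
--             for jdx in range(idx, len(mor_list)):
--                 if mor_list[jdx][1] != 'SL':
--                     stop_idx = jdx
--                     break
--     return stop_idx
-- ===== SOURCE B (Python) =====
-- def _find_SL_idx(mor_list):
--     # one right-to-left pass: return the nearest non-'SL' index after the last
--     # 'SL' token that has any non-'SL' token following it; 0 if none exists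
--     nxt = None
--     for idx in range(len(mor_list) - 1, -1, -1):
--         if mor_list[idx][1] == 'SL':
--             if nxt is not None:
--                 return nxt
--         else:
--             nxt = idx
--     return 0
-- ===== Notes on version B (the rewrite author's own statement) =====
-- stated objective: alternative
-- what changed: Replaced A's forward loop with a forward rescan at every 'SL' token by a single right-to-left pass that tracks the nearest non-'SL' index seen so far and returns it at the first (i.e. last-in-order) 'SL' token that has one.
import Mathlib
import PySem

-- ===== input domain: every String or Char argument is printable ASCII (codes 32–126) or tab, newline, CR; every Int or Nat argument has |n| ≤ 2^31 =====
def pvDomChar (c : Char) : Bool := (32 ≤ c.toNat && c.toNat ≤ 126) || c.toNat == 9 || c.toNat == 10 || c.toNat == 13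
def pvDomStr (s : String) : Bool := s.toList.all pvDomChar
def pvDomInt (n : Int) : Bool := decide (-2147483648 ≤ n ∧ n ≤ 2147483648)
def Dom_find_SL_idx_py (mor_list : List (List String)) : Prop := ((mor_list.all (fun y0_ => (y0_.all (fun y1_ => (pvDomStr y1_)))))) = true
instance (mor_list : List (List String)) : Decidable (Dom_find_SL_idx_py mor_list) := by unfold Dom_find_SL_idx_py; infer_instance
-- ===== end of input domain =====

-- B replaces A's forward loop with per-'SL' rescans by a single right-to-left pass; return values proved equal.

-- ===== PORT A =====
-- inner loop: 'for jdx in range(idx, len(mor_list)): if mor_list[jdx][1] != "SL": stop_idx = jdx; break'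
def pvInnerA (ml : List (List String)) : List Int → Int → Int
  | [], stop => stop
  | j :: rest, stop =>
    if PySem.List.pyGetD (PySem.List.pyGetD ml j []) 1 "" ≠ "SL" then j
    else pvInnerA ml rest stop

def find_SL_idx_py (mor_list : List (List String)) : Int :=
  (PySem.List.enumerate mor_list).foldl
    (fun stop p =>
      if PySem.List.pyGetD p.2 1 "" = "SL" then
        pvInnerA mor_list (PySem.List.pyRange p.1 (mor_list.length : Int) 1) stop
      else stop) 0

-- ===== PORT B =====
-- 'for idx in range(len(mor_list)-1, -1, -1): …' with early return; nxt = nearest non-'SL' index seen so far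
def pvGoB (ml : List (List String)) : List Int → Option Int → Int
  | [], _ => 0
  | i :: rest, nxt =>
    if PySem.List.pyGetD (PySem.List.pyGetD ml i []) 1 "" = "SL" then
      match nxt with
      | some j => j
      | none => pvGoB ml rest nxt
    else pvGoB ml rest (some i)

def find_SL_idx_py_alt (mor_list : List (List String)) : Int :=
  pvGoB mor_list (PySem.List.pyRange ((mor_list.length : Int) - 1) (-1) (-1)) none

-- ===== PRECONDITION & SPEC =====
-- A evaluates mor[1] for every token, so it raises IndexError exactly when some inner list has fewer than 2 entries.
def Pre_find_SL_idx_py (mor_list : List (List String)) : Prop :=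
  ∀ mor ∈ mor_list, 2 ≤ mor.length
instance (mor_list : List (List String)) : Decidable (Pre_find_SL_idx_py mor_list) := by unfold Pre_find_SL_idx_py; infer_instance
def pvWitness_find_SL_idx_py : List (List String) := [["han", "SL"], ["word", "NNG"]]

def Spec_find_SL_idx_py (mor_list : List (List String)) (out : Int) : Prop := out = find_SL_idx_py_alt mor_list
instance (mor_list : List (List String)) (out : Int) : Decidable (Spec_find_SL_idx_py mor_list out) := by unfold Spec_find_SL_idx_py; infer_instance

-- ===== CLAIM (what is proved, stated in full; the proofs are below) =====
def Claim_equal_find_SL_idx_py : Prop := ∀ (mor_list : List (List String)), Dom_find_SL_idx_py mor_list → Pre_find_SL_idx_py mor_list → Spec_find_SL_idx_py mor_list (find_SL_idx_py mor_list)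

-- ===== LEMMAS AND PROOFS =====

-- tag test shared by the abstractions below
def pvTg (mor : List String) : Bool := PySem.List.pyGetD mor 1 "" = "SL"

-- first non-'SL' index in a suffix whose first element has index i
def pvFfi : List (List String) → Int → Option Int
  | [], _ => none
  | m :: ms, i => if pvTg m then pvFfi ms (i + 1) else some i

-- abstraction of A's outer fold over a suffix starting at index i
def pvFA : List (List String) → Int → Int → Int
  | [], _, stop => stop
  | m :: ms, i, stop => pvFA ms (i + 1) (if pvTg m then (pvFfi (m :: ms) i).getD stop else stop)

-- the value both programs compute on a suffix: first non-'SL' index after the last firing 'SL'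
def pvW : List (List String) → Int → Option Int
  | [], _ => none
  | m :: ms, i =>
    match pvW ms (i + 1) with
    | some v => some v
    | none => if pvTg m then pvFfi (m :: ms) i else none

-- abstraction of B over the reversed prefix ending at index i
def pvGB : List (List String) → Int → Option Int → Int
  | [], _, _ => 0
  | m :: ms, i, nxt =>
    if pvTg m then
      match nxt with
      | some j => j
      | none => pvGB ms (i - 1) nxt
    else pvGB ms (i - 1) (some i)

theorem pvFA_eq_W (ts : List (List String)) : ∀ (i stop : Int), pvFA ts i stop = (pvW ts i).getD stop := by
  induction ts with
  | nil => intro i stop; rfl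
  | cons m ms ih =>
    intro i stop
    simp only [pvFA, pvW, ih]
    cases h : pvW ms (i + 1) with
    | some v => simp
    | none =>
      by_cases htg : pvTg m = true
      · simp only [htg, if_true]
        cases pvFfi (m :: ms) i <;> simp
      · simp [htg]

theorem pvW_append_some (vs : List (List String)) : ∀ (ss : List (List String)) (i v : Int),
    pvW ss (i + vs.length) = some v → pvW (vs ++ ss) i = some v := by
  induction vs with
  | nil => intro ss i v h; simpa using h
  | cons c vs' ih =>
    intro ss i v h
    simp only [List.cons_append, pvW]
    have hc : i + 1 + ((vs'.length : Nat) : Int) = i + (((c :: vs').length : Nat) : Int) := by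
      simp [List.length_cons]; ring
    rw [ih ss (i + 1) v (by rw [hc]; exact h)]

theorem pvGB_eq (rb : List (List String)) : ∀ (ts : List (List String)) (nxt : Option Int),
    nxt = pvFfi ts (rb.length : Int) → pvW ts (rb.length : Int) = none →
    pvGB rb ((rb.length : Int) - 1) nxt = (pvW (rb.reverse ++ ts) 0).getD 0 := by
  induction rb with
  | nil =>
    intro ts nxt h1 h2
    simp only [List.length_nil, Nat.cast_zero] at h2
    simp only [List.reverse_nil, List.nil_append, pvGB]
    simp [h2]
  | cons m rb' ih =>
    intro ts nxt h1 h2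
    simp only [List.length_cons, Nat.cast_add, Nat.cast_one] at h1 h2
    have hWcons : pvW (m :: ts) (rb'.length : Int) =
        (if pvTg m then pvFfi (m :: ts) (rb'.length : Int) else none) := by
      simp only [pvW, h2]
    have hassoc : (m :: rb').reverse ++ ts = rb'.reverse ++ (m :: ts) := by
      simp
    have hidx : ((((m :: rb').length : Nat)) : Int) - 1 = (rb'.length : Int) := by
      simp [List.length_cons]
    rw [hidx, hassoc]
    simp only [pvGB]
    by_cases htg : pvTg m = true
    · cases hn : nxt with
      | some j =>
        simp only [htg, if_true]
        have hffi : pvFfi (m :: ts) (rb'.length : Int) = some j := by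
          simp only [pvFfi, htg, if_true]
          rw [← h1, hn]
        have hW : pvW (m :: ts) (rb'.length : Int) = some j := by rw [hWcons]; simp [htg, hffi]
        have hlen : (0 : Int) + ((rb'.reverse.length : Nat) : Int) = (rb'.length : Int) := by simp
        rw [pvW_append_some rb'.reverse (m :: ts) 0 j (by rw [hlen]; exact hW)]
        simp
      | none =>
        simp only [htg, if_true]
        have hffi : pvFfi (m :: ts) (rb'.length : Int) = none := by
          simp only [pvFfi, htg, if_true]
          rw [← h1, hn]
        exact ih (m :: ts) none hffi.symm (by rw [hWcons]; simp [htg, hffi])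
    · simp only [htg, if_false, Bool.false_eq_true]
      have hffi : pvFfi (m :: ts) (rb'.length : Int) = some (rb'.length : Int) := by
        simp [pvFfi, htg]
      exact ih (m :: ts) (some (rb'.length : Int)) hffi.symm
        (by rw [hWcons]; simp [htg])

-- bridge: A's inner loop over pyRange equals pvFfi on the corresponding suffix (with default stop)
theorem pvInnerA_eq (ml : List (List String)) (xs : List (List String)) :
    ∀ (k : Nat) (stop : Int), xs = ml.drop k →
    pvInnerA ml (PySem.List.pyRange (k : Int) (ml.length : Int) 1) stop = (pvFfi xs (k : Int)).getD stop := by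
  induction xs with
  | nil =>
    intro k stop hd
    have hlen := congrArg List.length hd
    simp only [List.length_nil, List.length_drop] at hlen
    rw [PySem.List.pyRange_one_eq_nil (by omega)]
    rfl
  | cons x xs' ih =>
    intro k stop hd
    have hlen := congrArg List.length hd
    simp only [List.length_cons, List.length_drop] at hlen
    have hk : k < ml.length := by omega
    have h0 : ml[k]? = some x := by
      have := congrArg List.head? hd
      simpa [List.head?_drop] using this.symm
    have hx : PySem.List.pyGetD ml (k : Int) [] = x := by
      rw [PySem.List.pyGetD_natCast]
      simp [List.getD, h0]
    have hd' : xs' = ml.drop (k + 1) := by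
      have := congrArg List.tail hd
      simpa [List.tail_drop] using this
    rw [PySem.List.pyRange_one_cons (by exact_mod_cast hk)]
    simp only [pvInnerA, hx]
    have hstep : ((k : Int) + 1) = ((k + 1 : Nat) : Int) := by push_cast; ring
    by_cases htg : pvTg x = true
    · have hne : ¬ (PySem.List.pyGetD x 1 "" ≠ "SL") := by simpa [pvTg] using htg
      rw [if_neg hne, hstep, ih (k + 1) stop hd']
      simp only [pvFfi, htg, if_true, hstep]
    · have hne : (PySem.List.pyGetD x 1 "" ≠ "SL") := by simpa [pvTg] using htg
      rw [if_pos hne]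
      simp [pvFfi, htg]

-- bridge: A's fold over enumerate equals pvFA on the corresponding suffix
theorem pvFoldA_eq (ml : List (List String)) (xs : List (List String)) :
    ∀ (k : Nat) (stop : Int), xs = ml.drop k →
    (PySem.List.enumerate xs (k : Int)).foldl
      (fun stop p =>
        if PySem.List.pyGetD p.2 1 "" = "SL" then
          pvInnerA ml (PySem.List.pyRange p.1 (ml.length : Int) 1) stop
        else stop) stop = pvFA xs (k : Int) stop := by
  induction xs with
  | nil => intro k stop _; rfl
  | cons x xs' ih =>
    intro k stop hd
    rw [PySem.List.enumerate_cons]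
    simp only [List.foldl_cons, pvFA]
    have hstep : ((k : Int) + 1) = ((k + 1 : Nat) : Int) := by push_cast; ring
    have hd' : xs' = ml.drop (k + 1) := by
      have := congrArg List.tail hd
      simpa [List.tail_drop] using this
    rw [hstep, ih (k + 1) _ hd']
    congr 1
    by_cases htg : pvTg x = true
    · have hEq : PySem.List.pyGetD x 1 "" = "SL" := by simpa [pvTg] using htg
      rw [if_pos hEq, pvInnerA_eq ml (x :: xs') k stop hd]
      simp [htg]
    · have hne : ¬ (PySem.List.pyGetD x 1 "" = "SL") := by simpa [pvTg] using htg
      rw [if_neg hne]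
      simp [htg]

-- bridge: B's loop over the countdown range equals pvGB on the reversed prefix
theorem pvGoB_eq (ml : List (List String)) :
    ∀ (k : Nat), k ≤ ml.length → ∀ (nxt : Option Int),
    pvGoB ml (PySem.List.pyRange ((k : Int) - 1) (-1) (-1)) nxt = pvGB ((ml.take k).reverse) ((k : Int) - 1) nxt := by
  intro k
  induction k with
  | zero => intro _ nxt; rw [PySem.List.pyRange_neg_one_eq_nil (by norm_num)]; rfl
  | succ k' ih =>
    intro hk nxt
    have hk' : k' < ml.length := by omega
    have hrange : PySem.List.pyRange (((k' + 1 : Nat) : Int) - 1) (-1) (-1) =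
        (k' : Int) :: PySem.List.pyRange ((k' : Int) - 1) (-1) (-1) := by
      have : (((k' + 1 : Nat) : Int) - 1) = (k' : Int) := by push_cast; ring
      rw [this, PySem.List.pyRange_neg_one_cons (by omega)]
    have hx : PySem.List.pyGetD ml (k' : Int) [] = ml[k'] := by
      rw [PySem.List.pyGetD_natCast]
      simp [List.getD, List.getElem?_eq_getElem hk']
    have htake : (ml.take (k' + 1)).reverse = ml[k'] :: (ml.take k').reverse := by
      rw [List.take_add_one]
      simp [List.getElem?_eq_getElem hk']
    rw [hrange, htake]
    simp only [pvGoB, pvGB, hx]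
    have hidx : (((k' + 1 : Nat) : Int) - 1) = (k' : Int) := by push_cast; ring
    by_cases htg : pvTg ml[k'] = true
    · have hEq : PySem.List.pyGetD ml[k'] 1 "" = "SL" := by simpa [pvTg] using htg
      rw [if_pos hEq, if_pos htg]
      cases nxt with
      | some j => rfl
      | none => simp only [hidx]; exact ih (by omega) none
    · have hne : ¬ (PySem.List.pyGetD ml[k'] 1 "" = "SL") := by simpa [pvTg] using htg
      rw [if_neg hne, if_neg htg]
      simp only [hidx]
      exact ih (by omega) (some (k' : Int))

theorem pv_ports_eq (ml : List (List String)) : find_SL_idx_py ml = find_SL_idx_py_alt ml := by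
  have hA : find_SL_idx_py ml = (pvW ml 0).getD 0 := by
    unfold find_SL_idx_py
    have := pvFoldA_eq ml ml 0 0 (by simp)
    simp only [Nat.cast_zero] at this
    rw [show PySem.List.enumerate ml = PySem.List.enumerate ml 0 from rfl, this, pvFA_eq_W]
  have hB : find_SL_idx_py_alt ml = (pvW ml 0).getD 0 := by
    unfold find_SL_idx_py_alt
    rw [pvGoB_eq ml ml.length le_rfl none]
    have := pvGB_eq ml.reverse [] none (by simp [pvFfi]) (by simp [pvW])
    simp only [List.length_reverse, List.append_nil, List.reverse_reverse] at this
    simpa [List.take_length] using this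
  rw [hA, hB]

-- ===== VERDICT (by name: the statement is the Claim_ definition above) =====
theorem find_SL_idx_py_spec : Claim_equal_find_SL_idx_py := by
  intro ml _ _
  unfold Spec_find_SL_idx_py
  exact pv_ports_eq ml
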